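-- pv_equiv track=rewrite | github.com/SKINIKE/Algorithm | 프로그래머스/lv0/120861. 캐릭터의 좌표/캐릭터의 좌표.py | solution
-- ===== SOURCE A (Python) =====
-- def solution(keyinput, board):
--     bx = board[0] // 2
--     by = board[1] // 2
--     player = [0, 0]
--
--     for i in keyinput:
--         if i == "left" and player[0] != -bx:
--             player = [x+y for x,y in zip(player, [-1, 0])]
--         elif i == "right" and player[0] != bx:
--             player = [x+y for x,y in zip(player, [1, 0])]
--         elif i == "up" and player[1] != by:
--             player = [x+y for x,y in zip(player, [0, 1])]
--         elif i == "down" and player[1] != -by: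
--             player = [x+y for x,y in zip(player, [0, -1])]
--     return player
-- ===== SOURCE B (Python) =====
-- def solution(keyinput, board):
--     bx = board[0] // 2
--     by = board[1] // 2
--
--     def axis(pos, neg, bound):
--         c = 0
--         for k in keyinput:
--             if k == pos and c != bound:
--                 c += 1
--             elif k == neg and c != -bound:
--                 c -= 1
--         return c
--
--     return [axis("right", "left", bx), axis("up", "down", by)]
-- ===== Notes on version B (the rewrite author's own statement) =====
-- stated objective: simpler
-- what changed: B decomposes the move simulation by axis: a single generic 1-D bounded-walk helper is run once for x (right/left) and once for y (up/down), replacing A's interleaved four-branch elif chain that rebuilds the 2-element player list with zip comprehensions at every step.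
import Mathlib
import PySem

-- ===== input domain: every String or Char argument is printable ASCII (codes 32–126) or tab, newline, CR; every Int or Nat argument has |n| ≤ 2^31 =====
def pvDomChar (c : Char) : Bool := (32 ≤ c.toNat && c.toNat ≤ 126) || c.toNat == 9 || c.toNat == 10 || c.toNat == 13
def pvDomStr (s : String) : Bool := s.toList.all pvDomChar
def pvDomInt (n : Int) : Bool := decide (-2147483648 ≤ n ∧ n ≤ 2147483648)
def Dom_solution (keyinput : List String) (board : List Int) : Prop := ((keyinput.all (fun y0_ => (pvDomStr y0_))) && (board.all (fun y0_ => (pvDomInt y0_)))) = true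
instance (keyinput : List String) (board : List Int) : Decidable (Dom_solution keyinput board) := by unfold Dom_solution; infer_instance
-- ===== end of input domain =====

-- B replaces A's interleaved 2-D simulation (four elif branches building lists with zip)
-- by two independent 1-D walks, one per axis, via a single generic helper (objective: simpler).

-- ===== PORT A =====
-- player[k] read (always in range in A, as player is always a 2-list)
def pvPget (p : List Int) (k : Int) : Int := (PySem.List.pyGet? p k).getD 0

def pvStepA (bx by_ : Int) (player : List Int) (i : String) : List Int :=
  if i = "left" ∧ pvPget player 0 ≠ -bx then List.zipWith (· + ·) player [-1, 0]
  else if i = "right" ∧ pvPget player 0 ≠ bx then List.zipWith (· + ·) player [1, 0]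
  else if i = "up" ∧ pvPget player 1 ≠ by_ then List.zipWith (· + ·) player [0, 1]
  else if i = "down" ∧ pvPget player 1 ≠ -by_ then List.zipWith (· + ·) player [0, -1]
  else player

def solution (keyinput : List String) (board : List Int) : List Int :=
  match PySem.List.pyGet? board 0, PySem.List.pyGet? board 1 with
  | some b0, some b1 =>
    let bx := PySem.Int.floordiv b0 2
    let by_ := PySem.Int.floordiv b1 2
    keyinput.foldl (pvStepA bx by_) [0, 0]
  | _, _ => []   -- IndexError in Python; excluded by Pre_solution

-- ===== PORT B =====
def pvAxis (keyinput : List String) (pos neg : String) (bound : Int) : Int :=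
  keyinput.foldl (fun c k =>
    if k = pos ∧ c ≠ bound then c + 1
    else if k = neg ∧ c ≠ -bound then c - 1
    else c) 0

def solution_alt (keyinput : List String) (board : List Int) : List Int :=
  match PySem.List.pyGet? board 0 with
  | none => []   -- IndexError in Python; excluded by Pre_solution
  | some b0 =>
    match PySem.List.pyGet? board 1 with
    | none => []   -- IndexError in Python; excluded by Pre_solution
    | some b1 =>
      [pvAxis keyinput "right" "left" (PySem.Int.floordiv b0 2),
       pvAxis keyinput "up" "down" (PySem.Int.floordiv b1 2)]

-- ===== PRECONDITION & SPEC =====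
-- A raises IndexError when board has fewer than two entries; nothing else is excluded.
def Pre_solution (keyinput : List String) (board : List Int) : Prop := 2 ≤ board.length
instance (keyinput : List String) (board : List Int) : Decidable (Pre_solution keyinput board) := by unfold Pre_solution; infer_instance
def pvWitness_solution : List String × List Int := (["left", "up", "up"], [3, 5])

def Spec_solution (keyinput : List String) (board : List Int) (out : List Int) : Prop := out = solution_alt keyinput board
instance (keyinput : List String) (board : List Int) (out : List Int) : Decidable (Spec_solution keyinput board out) := by unfold Spec_solution; infer_instance

-- ===== CLAIM (what is proved, stated in full; the proofs are below) =====
def Claim_equal_solution : Prop := ∀ (keyinput : List String) (board : List Int), Dom_solution keyinput board → Pre_solution keyinput board → Spec_solution keyinput board (solution keyinput board)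

-- ===== LEMMAS AND PROOFS =====

-- B's per-axis step functions (the lambdas of pvAxis, specialised)
def pvStepX (bx : Int) (c : Int) (k : String) : Int :=
  if k = "right" ∧ c ≠ bx then c + 1 else if k = "left" ∧ c ≠ -bx then c - 1 else c
def pvStepY (by_ : Int) (c : Int) (k : String) : Int :=
  if k = "up" ∧ c ≠ by_ then c + 1 else if k = "down" ∧ c ≠ -by_ then c - 1 else c

theorem pvPget_zero (x y : Int) : pvPget [x, y] 0 = x := rfl
theorem pvPget_one (x y : Int) : pvPget [x, y] 1 = y := rfl

-- A's 2-D step on a 2-list is the product of B's two 1-D steps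
theorem stepA_eq (bx by_ x y : Int) (k : String) :
    pvStepA bx by_ [x, y] k = [pvStepX bx x k, pvStepY by_ y k] := by
  simp only [pvStepA, pvStepX, pvStepY, pvPget_zero, pvPget_one, List.zipWith]
  by_cases hl : k = "left" <;> by_cases hr : k = "right" <;>
    by_cases hu : k = "up" <;> by_cases hd : k = "down" <;>
    simp_all <;> split_ifs <;> simp_all <;> omega

-- A's fold decomposes into the two axis folds
theorem fold_decomp (bx by_ : Int) (keys : List String) :
    ∀ x y : Int, keys.foldl (pvStepA bx by_) [x, y]
      = [keys.foldl (pvStepX bx) x, keys.foldl (pvStepY by_) y] := by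
  induction keys with
  | nil => intro x y; rfl
  | cons k ks ih =>
      intro x y
      simp only [List.foldl_cons, stepA_eq]
      exact ih _ _

theorem pvAxis_x (keys : List String) (bx : Int) :
    pvAxis keys "right" "left" bx = keys.foldl (pvStepX bx) 0 := rfl
theorem pvAxis_y (keys : List String) (by_ : Int) :
    pvAxis keys "up" "down" by_ = keys.foldl (pvStepY by_) 0 := rfl

-- ===== VERDICT (by name: the statement is the Claim_ definition above) =====
theorem solution_spec : Claim_equal_solution := by
  intro keyinput board _ hpre
  unfold Spec_solution solution solution_alt
  match board, hpre with
  | b0 :: b1 :: rest, _ =>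
    have h0 : PySem.List.pyGet? (b0 :: b1 :: rest) (0 : Int) = some b0 :=
      PySem.List.pyGet?_zero_cons b0 (b1 :: rest)
    have h1 : PySem.List.pyGet? (b0 :: b1 :: rest) (1 : Int) = some b1 := by
      simp
    rw [h0, h1]
    simp only []
    rw [fold_decomp, pvAxis_x, pvAxis_y]
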